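-- pv_equiv track=rewrite | github.com/minsoo9506/computer-science-study | [Coding Test] 이코테/기출문제/09 문자열압축.py | solution
-- ===== SOURCE A (Python) =====
-- def solution(s):
--     answer = len(s)
--     for step in range(1, len(s) // 2 +1):
--         compressed = ''
--         prev = s[0:step]
--         count = 1
--         for j in range(step, len(s), step):
--             if s[j:j+step] == prev:
--                 count += 1
--             else:
--                 compressed += str(count) + prev if count >= 2 else prev
--                 count = 1
--                 prev =  s[j:j+step]
--         compressed += str(count) + prev if count >= 2 else prev
--         answer = min(answer, len(compressed))
--     return answer
-- ===== SOURCE B (Python) =====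
-- def solution(s):
--     n = len(s)
--     best = n
--     for k in range(1, n // 2 + 1):
--         m = -(-n // k)  # number of chunks of size k (the last may be shorter)
--         # positions j where chunk j differs from chunk j+1
--         cuts = [j for j in range(m - 1) if s[j*k:(j+1)*k] != s[(j+1)*k:(j+2)*k]]
--         edges = [-1] + cuts + [m - 1]
--         runs = [b - a for a, b in zip(edges, edges[1:])]
--         total = (len(runs) - 1) * k + (n - (m - 1) * k) \
--             + sum(len(str(r)) for r in runs if r >= 2)
--         best = min(best, total)
--     return best
-- ===== Notes on version B (the rewrite author's own statement) =====
-- stated objective: alternative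
-- what changed: A runs a prev/count state machine per step that concatenates a compressed string and measures its length; B instead builds the list of cut positions where adjacent chunks differ, converts consecutive edge positions into run lengths by zipping, and computes the compressed length arithmetically as (#runs-1)*k + tail-chunk length + sum of digit counts, never materialising a compressed string.
import Mathlib
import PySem

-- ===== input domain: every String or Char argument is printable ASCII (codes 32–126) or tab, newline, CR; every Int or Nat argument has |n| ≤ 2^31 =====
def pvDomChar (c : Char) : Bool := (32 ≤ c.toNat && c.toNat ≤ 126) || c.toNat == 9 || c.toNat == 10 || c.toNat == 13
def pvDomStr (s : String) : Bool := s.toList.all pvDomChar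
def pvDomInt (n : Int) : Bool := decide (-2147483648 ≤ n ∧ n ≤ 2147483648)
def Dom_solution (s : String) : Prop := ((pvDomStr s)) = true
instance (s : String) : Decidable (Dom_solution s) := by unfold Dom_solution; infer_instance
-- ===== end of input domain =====

-- B computes each step's compressed length arithmetically from the cut positions between unequal
-- adjacent chunks and run lengths obtained by zipping consecutive edges, building no compressed string.

-- ===== PORT A =====
-- compressed += str(count) + prev if count >= 2 else prev
def pvEmitA (count : Int) (prev : List Char) : List Char :=
  if count ≥ 2 then PySem.Int.toChars count ++ prev else prev

-- len(compressed) at the end of one iteration's inner loop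
def pvFinA (r : List Char × List Char × Int) : Int := ((r.1 ++ pvEmitA r.2.2 r.2.1).length : Int)

-- the body of A's outer loop for one value of step: state (compressed, prev, count)
def pvStepA (cs : List Char) (step : Int) : Int :=
  pvFinA ((PySem.List.pyRange step cs.length step).foldl
    (fun st j =>
      if PySem.List.slice cs (some j) (some (j + step)) == st.2.1 then
        (st.1, st.2.1, st.2.2 + 1)
      else
        (st.1 ++ pvEmitA st.2.2 st.2.1, PySem.List.slice cs (some j) (some (j + step)), (1 : Int)))
    (([] : List Char), PySem.List.slice cs (some 0) (some step), (1 : Int)))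

def solution (s : String) : Int :=
  (PySem.List.pyRange 1 (PySem.Int.floordiv s.toList.length 2 + 1) 1).foldl
    (fun answer step => min answer (pvStepA s.toList step)) (s.toList.length : Int)

-- ===== PORT B =====
-- len(str(r))
def pvDigits (r : Int) : Int := ((PySem.Int.toChars r).length : Int)

-- the cut test: (j + 2) * k > n or any(s[p] != s[p + k] for p in range(j * k, (j + 1) * k))
def pvCutPred (cs : List Char) (k : Int) (j : Int) : Bool :=
  !(PySem.List.slice cs (some (j * k)) (some ((j + 1) * k))
      == PySem.List.slice cs (some ((j + 1) * k)) (some ((j + 2) * k)))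

-- the body of B's outer loop for one value of k
def pvStepB (cs : List Char) (k : Int) : Int :=
  let n : Int := cs.length
  let m : Int := -(PySem.Int.floordiv (-n) k)
  let cuts := (PySem.List.pyRange 0 (m - 1) 1).filter (pvCutPred cs k)
  let edges := -1 :: (cuts ++ [m - 1])
  let runs := (edges.zip (PySem.List.slice edges (some 1) none)).map (fun ab => ab.2 - ab.1)
  ((runs.length : Int) - 1) * k + (n - (m - 1) * k)
    + ((runs.filter (fun r => decide (r ≥ 2))).map pvDigits).sum

def solution_alt (s : String) : Int :=
  (PySem.List.pyRange 1 (PySem.Int.floordiv s.toList.length 2 + 1) 1).foldl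
    (fun best k => min best (pvStepB s.toList k)) (s.toList.length : Int)

-- ===== PRECONDITION & SPEC =====
def Spec_solution (s : String) (out : Int) : Prop := out = solution_alt s
instance (s : String) (out : Int) : Decidable (Spec_solution s out) := by unfold Spec_solution; infer_instance

-- ===== CLAIM (what is proved, stated in full; the proofs are below) =====
def Claim_equal_solution : Prop := ∀ (s : String), Dom_solution s → Spec_solution s (solution s)

-- ===== LEMMAS AND PROOFS =====

-- A's inner-loop body, as a function of the current chunk
def pvBodyA : (List Char × List Char × Int) → List Char → (List Char × List Char × Int) :=
  fun st x =>
    if x == st.2.1 then (st.1, st.2.1, st.2.2 + 1)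
    else (st.1 ++ pvEmitA st.2.2 st.2.1, x, (1 : Int))

-- adjacent-equal runs of a list, carrying (current value, run count) — proof-side normal form
def pvGroupAux (cur : List Char) (cnt : Int) : List (List Char) → List (List Char × Int)
  | [] => [(cur, cnt)]
  | x :: rest => if x == cur then pvGroupAux cur (cnt + 1) rest else (cur, cnt) :: pvGroupAux x 1 rest

def pvGroupRuns : List (List Char) → List (List Char × Int)
  | [] => []
  | c :: rest => pvGroupAux c 1 rest

def pvWeight (g : List Char × Int) : Int :=
  (g.1.length : Int) + (if g.2 ≥ 2 then pvDigits g.2 else 0)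

-- cut positions of a chunk list, starting at offset j
def pvCutsRec : List (List Char) → Int → List Int
  | x :: y :: r, j => if x == y then pvCutsRec (y :: r) (j + 1) else j :: pvCutsRec (y :: r) (j + 1)
  | _, _ => []

-- end positions (cumulative counts, minus the final one) of a group list starting at offset
def pvEnds : List (List Char × Int) → Int → List Int
  | [], _ => []
  | (_, c) :: rest, off =>
      if rest.isEmpty then [] else (off + c - 1) :: pvEnds rest (off + c)

-- a positive-step range starting below its bound begins with its start
theorem pvPyRange_pos_cons (a b s : Int) (hs : 0 < s) (hab : a < b) :
    PySem.List.pyRange a b s = a :: PySem.List.pyRange (a + s) b s := by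
  rw [PySem.List.pyRange_of_pos _ _ hs, PySem.List.pyRange_of_pos _ _ hs]
  have hdiv : (b - a + s - 1) / s = (b - a - 1) / s + 1 := by
    have h := Int.add_mul_ediv_right (b - a - 1) 1 (by omega : s ≠ 0)
    have he : b - a + s - 1 = b - a - 1 + 1 * s := by ring
    rw [he, h]
  have hnn : 0 ≤ (b - a - 1) / s := Int.ediv_nonneg (by omega) (by omega)
  have hcount : ((b - a + s - 1) / s).toNat
      = (if a + s < b then ((b - (a + s) + s - 1) / s).toNat else 0) + 1 := by
    split_ifs with h
    · rw [show b - (a + s) + s - 1 = b - a - 1 by ring, hdiv]; omega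
    · have h0 : (b - a - 1) / s = 0 := Int.ediv_eq_zero_of_lt (by omega) (by omega)
      rw [hdiv, h0]; decide
  rw [if_pos hab, hcount, List.range_succ_eq_map]
  simp only [List.map_cons, List.map_map]
  refine List.cons_eq_cons.mpr ⟨by simp, ?_⟩
  apply List.map_congr_left
  intro k _
  simp only [Function.comp_apply]
  push_cast
  ring

-- A's inner loop over a chunk list measures exactly the group weights
theorem pvInner (rest : List (List Char)) (compressed prev : List Char) (count : Int) :
    pvFinA (rest.foldl pvBodyA (compressed, prev, count))
      = (compressed.length : Int) + ((pvGroupAux prev count rest).map pvWeight).sum := by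
  induction rest generalizing compressed prev count with
  | nil =>
    simp only [List.foldl_nil, pvGroupAux, pvFinA, List.map_cons, List.map_nil,
      List.sum_cons, List.sum_nil, pvEmitA, pvWeight, pvDigits]
    split_ifs <;> push_cast [List.length_append] <;> ring
  | cons x rs ih =>
    by_cases hx : (x == prev) = true
    · simp only [List.foldl_cons, pvBodyA, hx, if_true, pvGroupAux]
      exact ih compressed prev (count + 1)
    · simp only [List.foldl_cons, pvBodyA, hx, Bool.false_eq_true, if_false, pvGroupAux]
      rw [ih]
      simp only [List.map_cons, List.sum_cons, List.length_append, pvWeight, pvEmitA, pvDigits]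
      split_ifs <;> push_cast [List.length_append] <;> ring

-- total chunk count carried by a group list
theorem pvSumCounts (xs : List (List Char)) (cur : List Char) (cnt : Int) :
    ((pvGroupAux cur cnt xs).map (·.2)).sum = cnt + xs.length := by
  induction xs generalizing cur cnt with
  | nil => simp [pvGroupAux]
  | cons x r ih =>
    by_cases hx : (x == cur) = true
    · simp only [pvGroupAux, hx, if_true]; rw [ih]; push_cast [List.length_cons]; ring
    · simp only [pvGroupAux, hx, Bool.false_eq_true, if_false, List.map_cons, List.sum_cons]
      rw [ih]; push_cast [List.length_cons]; ring

-- cut positions of cur :: xs are the group end positions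
theorem pvGroupAux_ne_nil (xs : List (List Char)) (cur : List Char) (cnt : Int) :
    pvGroupAux cur cnt xs ≠ [] := by
  induction xs generalizing cur cnt with
  | nil => simp [pvGroupAux]
  | cons x r ih =>
    by_cases hx : (x == cur) = true <;> simp [pvGroupAux, hx, ih]

theorem pvCutsRec_eq_ends (xs : List (List Char)) (cur : List Char) (cnt off : Int) :
    pvCutsRec (cur :: xs) off = pvEnds (pvGroupAux cur cnt xs) (off - cnt + 1) := by
  induction xs generalizing cur cnt off with
  | nil => simp [pvCutsRec, pvGroupAux, pvEnds]
  | cons x r ih =>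
    by_cases hx : (x == cur) = true
    · have hxc : x = cur := by simpa using hx
      subst hxc
      simp only [pvCutsRec, BEq.rfl, if_true, pvGroupAux]
      rw [ih x (cnt + 1) (off + 1)]
      congr 1; ring
    · have hcx : (cur == x) = false := by
        rw [beq_eq_false_iff_ne]; intro h; exact hx (by simp [h])
      simp only [pvCutsRec, hcx, Bool.false_eq_true, if_false, pvGroupAux, hx, pvEnds]
      rw [if_neg (by simp [pvGroupAux_ne_nil])]
      rw [ih x 1 (off + 1)]
      refine List.cons_eq_cons.mpr ⟨by ring, ?_⟩
      congr 1; ring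

-- zip-differences of the edge list recover the run counts
theorem pvZipDiff (G : List (List Char × Int)) (off : Int) (hG : G ≠ []) :
    (((off - 1) :: (pvEnds G off ++ [off + ((G.map (·.2)).sum) - 1])).zip
        (pvEnds G off ++ [off + ((G.map (·.2)).sum) - 1])).map (fun ab => ab.2 - ab.1)
      = G.map (·.2) := by
  induction G generalizing off with
  | nil => exact absurd rfl hG
  | cons g G' ih =>
    obtain ⟨rv, c⟩ := g
    by_cases hG' : G' = []
    · subst hG'
      simp only [pvEnds, List.isEmpty_nil, if_true, List.nil_append, List.map_cons,
        List.map_nil, List.sum_cons, List.sum_nil, List.zip_cons_cons, List.zip_nil_right]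
      norm_num
    · simp only [pvEnds, List.isEmpty_iff, hG', if_false, List.map_cons, List.sum_cons,
        List.cons_append, List.zip_cons_cons]
      rw [show off + (c + (List.map (fun x => x.2) G').sum) - 1
            = off + c + (List.map (fun x => x.2) G').sum - 1 by ring]
      refine List.cons_eq_cons.mpr ⟨by ring, ?_⟩
      exact ih (off + c) hG'

-- sum of representative lengths: every group but the last is represented by a full chunk
theorem pvRepLens (xs : List (List Char)) (cur : List Char) (cnt K : Int)
    (hK : ∀ x ∈ (cur :: xs).dropLast, (x.length : Int) = K) :
    ((pvGroupAux cur cnt xs).map (fun g => (g.1.length : Int))).sum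
      = (((pvGroupAux cur cnt xs).length : Int) - 1) * K
        + (((cur :: xs).getLast (by simp)).length : Int) := by
  induction xs generalizing cur cnt with
  | nil => simp [pvGroupAux]
  | cons x r ih =>
    have hlast : (cur :: x :: r).getLast (by simp) = (x :: r).getLast (by simp) :=
      List.getLast_cons (by simp)
    have hcur : (cur.length : Int) = K := by
      apply hK; rw [List.dropLast_cons₂]; exact List.mem_cons_self
    by_cases hx : (x == cur) = true
    · have hxc : x = cur := by simpa using hx
      subst hxc
      simp only [pvGroupAux, BEq.rfl, if_true]
      have hK' : ∀ y ∈ (x :: r).dropLast, (y.length : Int) = K := by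
        intro y hy
        cases r with
        | nil => simp at hy
        | cons z r2 =>
          rcases (by simpa [List.dropLast_cons₂] using hy : y = x ∨ y ∈ (z :: r2).dropLast)
              with h | h
          · subst h; exact hcur
          · apply hK; rw [List.dropLast_cons₂, List.dropLast_cons₂]
            exact List.mem_cons_of_mem _ (List.mem_cons_of_mem _ h)
      rw [ih x (cnt + 1) hK', hlast]
    · simp only [pvGroupAux, hx, Bool.false_eq_true, if_false, List.map_cons, List.sum_cons,
        List.length_cons]
      have hK' : ∀ y ∈ (x :: r).dropLast, (y.length : Int) = K := by
        intro y hy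
        apply hK; rw [List.dropLast_cons₂]
        exact List.mem_cons_of_mem _ hy
      rw [ih x 1 hK', hcur, hlast]
      push_cast
      ring

-- sum over the filtered runs equals the pointwise guarded sum
theorem pvFilterSum (l : List Int) :
    ((l.filter (fun r => decide (r ≥ 2))).map pvDigits).sum
      = (l.map (fun c => if c ≥ 2 then pvDigits c else 0)).sum := by
  induction l with
  | nil => rfl
  | cons c l ih =>
    by_cases hc : c ≥ 2
    · simp [hc, ih]
    · simp [hc, ih]

-- B's filtered range of cut indices is the recursive cut list of the chunk tail
theorem pvFilterCuts (cs : List Char) (k mI : Int) (hk : 0 < k)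
    (hub : (mI - 1) * k < (cs.length : Int)) (hlb : (cs.length : Int) ≤ mI * k) :
    ∀ (d : Nat) (j : Int), 0 ≤ j → mI - 1 - j = d →
    (PySem.List.pyRange j (mI - 1) 1).filter (pvCutPred cs k)
      = pvCutsRec ((PySem.List.pyRange (j * k) (cs.length : Int) k).map
          (fun i => PySem.List.slice cs (some i) (some (i + k)))) j := by
  intro d
  induction d with
  | zero =>
    intro j hj hd
    have hj' : j = mI - 1 := by omega
    subst hj'
    rw [PySem.List.pyRange_one_eq_nil (le_refl _), List.filter_nil]
    rw [pvPyRange_pos_cons _ _ k hk hub]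
    have emk : (mI - 1) * k + k = mI * k := by ring
    have htail : PySem.List.pyRange ((mI - 1) * k + k) (cs.length : Int) k = [] := by
      rw [PySem.List.pyRange_of_pos _ _ hk, if_neg (by omega), List.range_zero, List.map_nil]
    rw [htail, List.map_cons, List.map_nil]
    rfl
  | succ d ih =>
    intro j hj hd
    have hjlt : j < mI - 1 := by omega
    have e1k : (j + 1) * k = j * k + k := by ring
    have e2k : (j + 2) * k = j * k + k + k := by ring
    have hmono : (j + 1) * k ≤ (mI - 1) * k :=
      mul_le_mul_of_nonneg_right (by omega) (le_of_lt hk)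
    have hj1k : j * k + k < (cs.length : Int) := by omega
    have hjk : j * k < (cs.length : Int) := by omega
    rw [PySem.List.pyRange_one_cons hjlt, List.filter_cons]
    rw [pvPyRange_pos_cons (j * k) _ k hk hjk, pvPyRange_pos_cons (j * k + k) _ k hk hj1k,
      List.map_cons, List.map_cons]
    have hih := ih (j + 1) (by omega) (by omega)
    rw [pvPyRange_pos_cons ((j + 1) * k) _ k hk (by omega), List.map_cons, e1k] at hih
    by_cases heq : PySem.List.slice cs (some (j * k)) (some (j * k + k))
        = PySem.List.slice cs (some (j * k + k)) (some (j * k + k + k))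
    · have hpred : pvCutPred cs k j = false := by
        unfold pvCutPred
        rw [e1k, e2k, beq_iff_eq.mpr heq]
        rfl
      rw [hpred, if_neg (by simp)]
      rw [show pvCutsRec
            (PySem.List.slice cs (some (j * k)) (some (j * k + k))
              :: PySem.List.slice cs (some (j * k + k)) (some (j * k + k + k))
              :: (PySem.List.pyRange (j * k + k + k) (cs.length : Int) k).map
                  (fun i => PySem.List.slice cs (some i) (some (i + k)))) j
          = pvCutsRec
            (PySem.List.slice cs (some (j * k + k)) (some (j * k + k + k))
              :: (PySem.List.pyRange (j * k + k + k) (cs.length : Int) k).map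
                  (fun i => PySem.List.slice cs (some i) (some (i + k)))) (j + 1) by
        simp [pvCutsRec, heq]]
      rw [hih]

    · have hpred : pvCutPred cs k j = true := by
        unfold pvCutPred
        rw [e1k, e2k]
        simp [heq]
      rw [hpred, if_pos rfl]
      rw [show pvCutsRec
            (PySem.List.slice cs (some (j * k)) (some (j * k + k))
              :: PySem.List.slice cs (some (j * k + k)) (some (j * k + k + k))
              :: (PySem.List.pyRange (j * k + k + k) (cs.length : Int) k).map
                  (fun i => PySem.List.slice cs (some i) (some (i + k)))) j
          = j :: pvCutsRec
            (PySem.List.slice cs (some (j * k + k)) (some (j * k + k + k))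
              :: (PySem.List.pyRange (j * k + k + k) (cs.length : Int) k).map
                  (fun i => PySem.List.slice cs (some i) (some (i + k)))) (j + 1) by
        simp [pvCutsRec, heq]]
      rw [hih]

-- a chunk wholly inside the string has length k
theorem pvSliceLen (cs : List Char) (i k : Int) (h0 : 0 ≤ i) (hk : 0 < k)
    (hle : i + k ≤ (cs.length : Int)) :
    (((PySem.List.slice cs (some i) (some (i + k))).length : Int)) = k := by
  rw [PySem.List.slice_toNat cs h0 (by omega)]
  simp only [List.length_take, List.length_drop]
  omega

-- the final chunk has length n - i
theorem pvSliceLenLast (cs : List Char) (i k : Int) (h0 : 0 ≤ i) (hk : 0 < k)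
    (hlt : i < (cs.length : Int)) (hge : (cs.length : Int) ≤ i + k) :
    (((PySem.List.slice cs (some i) (some (i + k))).length : Int)) = (cs.length : Int) - i := by
  rw [PySem.List.slice_toNat cs h0 (by omega)]
  simp only [List.length_take, List.length_drop]
  omega

-- the weight of a group splits into representative length plus digit cost
theorem pvWeightSplit (G : List (List Char × Int)) :
    (G.map pvWeight).sum
      = (G.map (fun g => (g.1.length : Int))).sum
        + (G.map (fun g => if g.2 ≥ 2 then pvDigits g.2 else 0)).sum := by
  induction G with
  | nil => rfl
  | cons g G ih =>
    simp only [List.map_cons, List.sum_cons, ih, pvWeight]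
    ring

theorem pvStep_eq (cs : List Char) (k : Int) (hk : 0 < k) (h2k : 2 * k ≤ (cs.length : Int)) :
    pvStepA cs k = pvStepB cs k := by
  have hn : (0 : Int) < (cs.length : Int) := by omega
  set n : Int := (cs.length : Int) with hnd
  set mI : Int := -(PySem.Int.floordiv (-n) k) with hmd
  have hm : (mI - 1) * k < n ∧ n ≤ mI * k :=
    (PySem.Int.neg_floordiv_neg_eq_iff_of_pos hk).mp hmd.symm
  have hm2 : 2 ≤ mI := by
    by_contra h
    have h1 : mI * k ≤ 1 * k := mul_le_mul_of_nonneg_right (by omega) (le_of_lt hk)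
    omega
  set f : Int → List Char := fun i => PySem.List.slice cs (some i) (some (i + k)) with hf
  have hfd : (n + k - 1) / k = mI := by
    have h : PySem.Int.floordiv (n + k - 1) k = mI := by
      rw [PySem.Int.floordiv_eq_iff_of_pos hk]
      have e1 : (mI - 1) * k = mI * k - k := by ring
      have e2 : (mI + 1) * k = mI * k + k := by ring
      omega
    rw [PySem.Int.floordiv_eq_ediv_of_pos hk] at h
    exact h
  set cnt : Nat := ((n - 0 + k - 1) / k).toNat with hcntd
  have hcnt : (cnt : Int) = mI := by
    rw [hcntd, show n - 0 + k - 1 = n + k - 1 by ring, hfd]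
    omega
  have hrange : PySem.List.pyRange 0 n k = (List.range cnt).map (fun t : Nat => 0 + k * (t : Int)) := by
    rw [PySem.List.pyRange_of_pos _ _ hk, if_pos hn]
  set tl : List (List Char) := (PySem.List.pyRange k n k).map f with htl
  set G : List (List Char × Int) := pvGroupAux (f 0) 1 tl with hG
  -- A's side reduces to the sum of group weights
  have hA : pvStepA cs k = (G.map pvWeight).sum := by
    unfold pvStepA
    rw [show (PySem.List.pyRange k n k).foldl
        (fun st j =>
          if PySem.List.slice cs (some j) (some (j + k)) == st.2.1 then
            (st.1, st.2.1, st.2.2 + 1)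
          else
            (st.1 ++ pvEmitA st.2.2 st.2.1, PySem.List.slice cs (some j) (some (j + k)), (1 : Int)))
        (([] : List Char), PySem.List.slice cs (some 0) (some k), (1 : Int))
      = tl.foldl pvBodyA (([] : List Char), f 0, (1 : Int)) by
        rw [htl, List.foldl_map, hf]
        simp only [zero_add]
        rfl]
    rw [pvInner]
    simp [hG]
  have hmN : ((PySem.List.pyRange 0 n k).length : Int) = mI := by
    rw [hrange, List.length_map, List.length_range, hcnt]
  have htlLen : ((tl.length : Int)) = mI - 1 := by
    have h0 : PySem.List.pyRange 0 n k = 0 :: PySem.List.pyRange k n k := by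
      have h := pvPyRange_pos_cons 0 n k hk hn
      rw [zero_add] at h
      exact h
    rw [htl, List.length_map]
    rw [h0, List.length_cons] at hmN
    push_cast at hmN ⊢
    omega
  have hS : ((G.map (·.2)).sum) = mI := by
    rw [hG, pvSumCounts]
    omega
  have hGne : G ≠ [] := pvGroupAux_ne_nil _ _ _
  have hL : f 0 :: tl = (PySem.List.pyRange 0 n k).map f := by
    rw [show PySem.List.pyRange 0 n k = 0 :: PySem.List.pyRange k n k by
          have h' := pvPyRange_pos_cons 0 n k hk hn
          rw [zero_add] at h'
          exact h', List.map_cons, htl]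
  -- the cut list equals the group end positions
  have hcuts : (PySem.List.pyRange 0 (mI - 1) 1).filter (pvCutPred cs k) = pvEnds G 0 := by
    have h := pvFilterCuts cs k mI hk hm.1 hm.2 (mI - 1).toNat 0 (le_refl 0) (by omega)
    rw [zero_mul] at h
    rw [show PySem.List.pyRange 0 n k = 0 :: PySem.List.pyRange k n k by
          have h' := pvPyRange_pos_cons 0 n k hk hn
          rw [zero_add] at h'
          exact h'] at h
    rw [List.map_cons] at h
    rw [h, ← htl]
    rw [show PySem.List.slice cs (some 0) (some (0 + k)) = f 0 from rfl]
    rw [pvCutsRec_eq_ends tl (f 0) 1 0, ← hG]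
    norm_num
  -- B's side
  unfold pvStepB
  dsimp only
  rw [hA, ← hnd, ← hmd, hcuts, PySem.List.slice_from_one]
  have hzip := pvZipDiff G 0 hGne
  rw [hS] at hzip
  rw [show (0 : Int) - 1 = -1 by norm_num, show (0 : Int) + mI - 1 = mI - 1 by ring] at hzip
  simp only [List.tail_cons]
  rw [hzip]
  -- split weights and compute the two sums
  rw [pvWeightSplit]
  have hrep : (G.map (fun g => (g.1.length : Int))).sum
      = ((G.length : Int) - 1) * k + (n - (mI - 1) * k) := by
    have hypK : ∀ x ∈ (f 0 :: tl).dropLast, ((x.length : Int)) = k := by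
      intro x hx
      rw [hL, ← List.map_dropLast] at hx
      obtain ⟨i, hi, hix⟩ := List.mem_map.mp hx
      have hibound : 0 ≤ i ∧ i + k ≤ n := by
        rw [hrange, ← List.map_dropLast] at hi
        obtain ⟨t, ht, hti⟩ := List.mem_map.mp hi
        have htr : t ∈ List.range cnt := List.mem_of_mem_dropLast ht
        have htlt : t < cnt := List.mem_range.mp htr
        have htne : t ≠ cnt - 1 := by
          intro hcon
          subst hcon
          have hc2 : 2 ≤ cnt := by omega
          rw [show List.range cnt = List.range (cnt - 1) ++ [cnt - 1] by
                rw [← List.range_succ]; congr 1; omega] at ht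
          rw [List.dropLast_concat] at ht
          exact absurd (List.mem_range.mp ht) (by omega)
        have ht2 : ((t : Int)) + 1 ≤ mI - 1 := by omega
        have hmul : k * ((t : Int) + 1) ≤ k * (mI - 1) :=
          mul_le_mul_of_nonneg_left ht2 (le_of_lt hk)
        have e1 : k * (mI - 1) = (mI - 1) * k := by ring
        have e2 : k * ((t : Int) + 1) = k * (t : Int) + k := by ring
        constructor
        · rw [← hti]; positivity
        · rw [← hti]; omega
      rw [← hix, hf]
      exact pvSliceLen cs i k hibound.1 hk hibound.2
    have hlast : (((f 0 :: tl).getLast (by simp)).length : Int) = n - (mI - 1) * k := by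
      have hc2 : 2 ≤ cnt := by omega
      have hgl : (f 0 :: tl).getLast (by simp) = f (k * ((cnt - 1 : Nat) : Int)) := by
        rw [List.getLast_eq_getElem]
        simp only [hL, hrange, List.map_map, List.length_map, List.length_range]
        rw [List.getElem_map, List.getElem_range]
        simp only [Function.comp_apply, zero_add]
      rw [hgl, hf]
      have hc1 : ((cnt - 1 : Nat) : Int) = mI - 1 := by omega
      rw [hc1]
      have e1 : k * (mI - 1) = (mI - 1) * k := by ring
      rw [e1]
      rw [pvSliceLenLast cs ((mI - 1) * k) k (by nlinarith [hm.1, hm.2]) hk hm.1 (by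
        have e2 : (mI - 1) * k + k = mI * k := by ring
        omega)]
    rw [hG, pvRepLens tl (f 0) 1 k hypK, hlast]
  rw [hrep, pvFilterSum, List.map_map]
  rw [List.length_map]
  rfl

-- ===== VERDICT (by name: the statement is the Claim_ definition above) =====
theorem solution_spec : Claim_equal_solution := by
  intro s _
  unfold Spec_solution solution solution_alt
  apply PySem.List.foldl_congr_mem
  intro acc x hx
  rw [PySem.List.mem_pyRange_one] at hx
  rw [PySem.Int.floordiv_eq_ediv_of_pos (by omega)] at hx
  rw [pvStep_eq s.toList x (by omega) (by omega)]
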